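-- pv_equiv track=rewrite | github.com/midnightntwrk/midnight-zk | zk_stdlib/examples/passport/credentials/generate.py | check_digit
-- ===== SOURCE A (Python) =====
-- def check_digit(data: str) -> str:
--     weights = [7, 3, 1]
--     total = 0
--     for i, ch in enumerate(data):
--         if ch == "<":
--             val = 0
--         elif ch.isdigit():
--             val = int(ch)
--         elif ch.isalpha():
--             val = ord(ch.upper()) - ord("A") + 10
--         else:
--             val = 0
--         total += val * weights[i % 3]
--     return str(total % 10)
-- ===== SOURCE B (Python) =====
-- def _value(ch):
--     if ch == "<":
--         return 0
--     elif ch.isdigit():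
--         return int(ch)
--     elif ch.isalpha():
--         return ord(ch.upper()) - ord("A") + 10
--     else:
--         return 0
--
--
-- def check_digit(data: str) -> str:
--     # consume the string in chunks of three characters with the fixed
--     # weight pattern (7, 3, 1), instead of one indexed pass cycling i % 3
--     total = 0
--     rest = data
--     while rest:
--         chunk, rest = rest[:3], rest[3:]
--         vals = [_value(c) for c in chunk] + [0, 0]
--         total += 7 * vals[0] + 3 * vals[1] + vals[2]
--     return str(total % 10)
-- ===== Notes on version B (the rewrite author's own statement) =====
-- stated objective: alternative
-- what changed: B consumes the string in chunks of three characters with the fixed weight pattern (7,3,1) per chunk, instead of A's single indexed enumerate loop selecting weights[i % 3]; it trades A's index arithmetic for chunked consumption (the rest-of-string re-slicing makes Python B quadratic).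
import Mathlib
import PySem

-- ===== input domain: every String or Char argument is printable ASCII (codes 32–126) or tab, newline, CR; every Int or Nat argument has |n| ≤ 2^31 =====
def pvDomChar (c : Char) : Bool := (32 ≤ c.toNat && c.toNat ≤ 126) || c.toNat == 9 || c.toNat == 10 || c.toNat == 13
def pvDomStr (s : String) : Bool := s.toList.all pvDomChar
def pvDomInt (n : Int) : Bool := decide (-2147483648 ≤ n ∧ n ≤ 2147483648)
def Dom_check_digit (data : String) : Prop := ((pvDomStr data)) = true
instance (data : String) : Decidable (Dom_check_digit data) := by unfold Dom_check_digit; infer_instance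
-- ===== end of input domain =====

-- B consumes the string in chunks of three with the fixed weight pattern (7,3,1)
-- instead of A's single enumerate loop selecting weights[i % 3]; same cost, different decomposition.


-- ===== PORT A =====
-- per-character value of A's if/elif ladder; int(ch) via PySem.Int.ofStr?
-- (getD 0 is unreachable on the ASCII domain: Chars.isdigit accepts exactly '0'-'9' there)
def pvValA (ch : Char) : Int :=
  if ch == '<' then 0
  else if PySem.Chars.isdigit ch then (PySem.Int.ofStr? (String.ofList [ch])).getD 0
  else if PySem.Chars.isalpha ch then ((PySem.Chars.upperChar ch).toNat : Int) - ('A'.toNat : Int) + 10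
  else 0

def check_digit (data : String) : String :=
  let weights : List Int := [7, 3, 1]
  let total : Int := (PySem.List.enumerate data.toList 0).foldl
    (fun total p => total + pvValA p.2 * PySem.List.pyGetD weights (PySem.Int.mod p.1 3) 0) 0
  PySem.Int.toStr (PySem.Int.mod total 10)

-- ===== PORT B =====
def pvValB (ch : Char) : Int :=
  if ch == '<' then 0
  else if PySem.Chars.isdigit ch then (PySem.Int.ofStr? (String.ofList [ch])).getD 0
  else if PySem.Chars.isalpha ch then ((PySem.Chars.upperChar ch).toNat : Int) - ('A'.toNat : Int) + 10
  else 0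

-- chunk-of-three recursion; short final chunks are padded with zeros as in Source B
def pvGoB : List Char → Int
  | [] => 0
  | [c0] => 7 * pvValB c0 + 3 * 0 + 0
  | [c0, c1] => 7 * pvValB c0 + 3 * pvValB c1 + 0
  | c0 :: c1 :: c2 :: rest => 7 * pvValB c0 + 3 * pvValB c1 + pvValB c2 + pvGoB rest

def check_digit_alt (data : String) : String :=
  PySem.Int.toStr (PySem.Int.mod (pvGoB data.toList) 10)

-- ===== PRECONDITION & SPEC =====
def Spec_check_digit (data : String) (out : String) : Prop := out = check_digit_alt data
instance (data : String) (out : String) : Decidable (Spec_check_digit data out) := by unfold Spec_check_digit; infer_instance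

-- ===== CLAIM (what is proved, stated in full; the proofs are below) =====
def Claim_equal_check_digit : Prop := ∀ (data : String), Dom_check_digit data → Spec_check_digit data (check_digit data)

-- ===== LEMMAS AND PROOFS =====
theorem pvVal_eq : pvValA = pvValB := rfl

theorem pvMod (i r : Int) (h : i % 3 = r) : PySem.Int.mod i 3 = r := by
  rw [PySem.Int.mod_eq_emod_of_pos (by norm_num)]; exact h

theorem pvFoldA (l : List Char) : ∀ (i t : Int), i % 3 = 0 →
    (PySem.List.enumerate l i).foldl
      (fun total p => total + pvValA p.2 * PySem.List.pyGetD [7, 3, 1] (PySem.Int.mod p.1 3) 0) t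
      = t + pvGoB l := by
  induction l using pvGoB.induct with
  | case1 => intro i t h; simp [PySem.List.enumerate, pvGoB]
  | case2 c0 =>
    intro i t h
    simp only [PySem.List.enumerate_cons, PySem.List.enumerate_nil, List.foldl_cons,
      List.foldl_nil, pvGoB, pvVal_eq]
    rw [pvMod i 0 h]
    simp [PySem.List.pyGetD]; ring
  | case3 c0 c1 =>
    intro i t h
    simp only [PySem.List.enumerate_cons, PySem.List.enumerate_nil, List.foldl_cons,
      List.foldl_nil, pvGoB, pvVal_eq]
    rw [pvMod i 0 h, pvMod (i + 1) 1 (by omega)]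
    simp [PySem.List.pyGetD]; ring
  | case4 c0 c1 c2 rest ih =>
    intro i t h
    simp only [pvVal_eq] at ih
    simp only [PySem.List.enumerate_cons, List.foldl_cons, pvGoB, pvVal_eq]
    rw [pvMod i 0 h, pvMod (i + 1) 1 (by omega), pvMod (i + 1 + 1) 2 (by omega),
      ih (i + 1 + 1 + 1) _ (by omega)]
    simp [PySem.List.pyGetD]; ring

-- ===== VERDICT (by name: the statement is the Claim_ definition above) =====
theorem check_digit_spec : Claim_equal_check_digit := by
  intro data _
  show check_digit data = check_digit_alt data
  simp only [check_digit, check_digit_alt]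
  rw [pvFoldA data.toList 0 0 (by norm_num)]
  norm_num
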